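-- pv_equiv track=rewrite | github.com/orangeneko85/shooting_game | main.py | get_bullet_path
-- ===== SOURCE A (Python) =====
-- GRID_SIZE = 5
--
-- PLAYER_POS = (2, 2)
--
-- def get_bullet_path(direction):
--     py, px = PLAYER_POS
--     path = []
--
--     if direction == 'w':
--         for y in range(py - 1, -1, -1):
--             path.append((y, px))
--     elif direction == 's':
--         for y in range(py + 1, GRID_SIZE):
--             path.append((y, px))
--     elif direction == 'a':
--         for x in range(px - 1, -1, -1):
--             path.append((py, x))
--     elif direction == 'd':
--         for x in range(px + 1, GRID_SIZE):
--             path.append((py, x))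
--
--     return path
-- ===== SOURCE B (Python) =====
-- GRID_SIZE = 5
--
-- PLAYER_POS = (2, 2)
--
-- def get_bullet_path(direction):
--     deltas = {'w': (-1, 0), 's': (1, 0), 'a': (0, -1), 'd': (0, 1)}
--     if direction not in deltas:
--         return []
--     dy, dx = deltas[direction]
--     y, x = PLAYER_POS
--     path = []
--     while True:
--         y, x = y + dy, x + dx
--         if not (0 <= y < GRID_SIZE and 0 <= x < GRID_SIZE):
--             break
--         path.append((y, x))
--     return path
-- ===== Notes on version B (the rewrite author's own statement) =====
-- stated objective: simpler
-- what changed: Replaces the four separate range-based branches with one table-driven stepping loop: a dict maps each direction to a unit delta and a single while loop walks from PLAYER_POS until it leaves the grid.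
import Mathlib
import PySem

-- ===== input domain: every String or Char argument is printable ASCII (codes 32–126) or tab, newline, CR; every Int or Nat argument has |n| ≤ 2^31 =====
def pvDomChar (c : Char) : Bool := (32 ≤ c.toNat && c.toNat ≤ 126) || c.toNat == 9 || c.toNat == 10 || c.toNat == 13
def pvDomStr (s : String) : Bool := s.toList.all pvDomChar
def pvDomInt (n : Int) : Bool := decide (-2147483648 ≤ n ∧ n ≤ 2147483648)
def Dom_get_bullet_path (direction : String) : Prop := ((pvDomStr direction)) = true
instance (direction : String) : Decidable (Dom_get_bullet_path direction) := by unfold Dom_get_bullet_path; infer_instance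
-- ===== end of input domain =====

-- B replaces A's four range-based branches with one table-driven stepping loop (objective: simpler).

-- ===== PORT A =====
-- literal transliteration of A: four branches, each folding an append over a Python range
def get_bullet_path (direction : String) : List (Int × Int) :=
  let py : Int := 2
  let px : Int := 2
  let path : List (Int × Int) := []
  if direction == "w" then
    (PySem.List.pyRange (py - 1) (-1) (-1)).foldl (fun acc y => acc ++ [(y, px)]) path
  else if direction == "s" then
    (PySem.List.pyRange (py + 1) 5 1).foldl (fun acc y => acc ++ [(y, px)]) path
  else if direction == "a" then
    (PySem.List.pyRange (px - 1) (-1) (-1)).foldl (fun acc x => acc ++ [(py, x)]) path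
  else if direction == "d" then
    (PySem.List.pyRange (px + 1) 5 1).foldl (fun acc x => acc ++ [(py, x)]) path
  else path

-- ===== PORT B =====
-- Source B's unbounded `while True` walk, ported with fuel 5 (= GRID_SIZE): each step moves one
-- cell, so at most GRID_SIZE iterations are possible before leaving the 5×5 grid.
def bulletWalk : Nat → Int → Int → Int → Int → List (Int × Int)
  | 0, _, _, _, _ => []
  | n + 1, y, x, dy, dx =>
    let y' := y + dy
    let x' := x + dx
    if 0 ≤ y' ∧ y' < 5 ∧ 0 ≤ x' ∧ x' < 5 then
      (y', x') :: bulletWalk n y' x' dy dx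
    else []

def get_bullet_path_alt (direction : String) : List (Int × Int) :=
  let deltas : PySem.Dict String (Int × Int) :=
    PySem.Dict.ofList [("w", (-1, 0)), ("s", (1, 0)), ("a", (0, -1)), ("d", (0, 1))]
  match deltas.get? direction with
  | none => []
  | some (dy, dx) => bulletWalk 5 2 2 dy dx

-- ===== PRECONDITION & SPEC =====
def Spec_get_bullet_path (direction : String) (out : List (Int × Int)) : Prop := out = get_bullet_path_alt direction
instance (direction : String) (out : List (Int × Int)) : Decidable (Spec_get_bullet_path direction out) := by unfold Spec_get_bullet_path; infer_instance

-- ===== CLAIM (what is proved, stated in full; the proofs are below) =====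
def Claim_equal_get_bullet_path : Prop := ∀ (direction : String), Dom_get_bullet_path direction → Spec_get_bullet_path direction (get_bullet_path direction)

-- ===== LEMMAS AND PROOFS =====
theorem get_bullet_path_other (d : String) (hw : d ≠ "w") (hs : d ≠ "s")
    (ha : d ≠ "a") (hd : d ≠ "d") : get_bullet_path d = [] := by
  simp [get_bullet_path, hw, hs, ha, hd]

theorem get_bullet_path_alt_other (d : String) (hw : d ≠ "w") (hs : d ≠ "s")
    (ha : d ≠ "a") (hd : d ≠ "d") : get_bullet_path_alt d = [] := by
  simp [get_bullet_path_alt, PySem.Dict.ofList, PySem.Dict.get?, PySem.Dict.update,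
    PySem.Dict.insert, PySem.Dict.empty, List.find?, beq_iff_eq,
    show (("w" : String) == d) = false from beq_eq_false_iff_ne.mpr (Ne.symm hw),
    show (("s" : String) == d) = false from beq_eq_false_iff_ne.mpr (Ne.symm hs),
    show (("a" : String) == d) = false from beq_eq_false_iff_ne.mpr (Ne.symm ha),
    show (("d" : String) == d) = false from beq_eq_false_iff_ne.mpr (Ne.symm hd)]

-- ===== VERDICT (by name: the statement is the Claim_ definition above) =====
theorem get_bullet_path_spec : Claim_equal_get_bullet_path := by
  intro d _
  unfold Spec_get_bullet_path
  by_cases hw : d = "w"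
  · subst hw; decide
  by_cases hs : d = "s"
  · subst hs; decide
  by_cases ha : d = "a"
  · subst ha; decide
  by_cases hd : d = "d"
  · subst hd; decide
  rw [get_bullet_path_other d hw hs ha hd, get_bullet_path_alt_other d hw hs ha hd]
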